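-- pv_equiv track=rewrite | github.com/dinhhaunguyen88-png/Aviation-Operation-Overview | swap_detector.py | _build_mod_log_index
-- ===== SOURCE A (Python) =====
-- from typing import List, Dict, Any, Optional, Tuple
--
-- def _build_mod_log_index(mod_logs: List[Dict[str, Any]]) -> Dict[str, Dict[str, Any]]:
--     """
--     Build index of modification logs by flight key for quick lookup.
--     Prioritize entries that mention aircraft/registration changes.
--     """
--     index = {}
--
--     if not mod_logs:
--         return index
--
--     for log in mod_logs:
--         flight_num = str(log.get("flight_number", "")).strip()
--         flight_dt = str(log.get("flight_date", "")).strip()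
--
--         if not flight_num:
--             continue
--
--         key = f"{flight_dt}|{flight_num}"
--         status = str(log.get("status_desc", "")).upper()
--
--         # Prioritize entries mentioning aircraft changes
--         existing = index.get(key)
--         if not existing or _is_aircraft_change(status):
--             index[key] = log
--
--     return index
--
-- def _is_aircraft_change(status_desc: str) -> bool:
--     """Check if modification log entry relates to aircraft change."""
--     if not status_desc:
--         return False
--     upper = status_desc.upper()
--     return any(kw in upper for kw in [
--         "AIRCRAFT", "REG", "SWAP", "EQUIPMENT", "A/C", "AC TYPE",
--         "TAIL", "CHANGE", "REPLACE"
--     ])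
-- ===== SOURCE B (Python) =====
-- def _build_mod_log_index(mod_logs):
--     """One linear pass keeping two maps: first valid entry per key, and the
--     last aircraft-change entry per key; merge them at the end."""
--     first_seen = {}
--     last_ac = {}
--     for log in mod_logs:
--         flight_num = str(log.get("flight_number", "")).strip()
--         if not flight_num:
--             continue
--         flight_dt = str(log.get("flight_date", "")).strip()
--         key = f"{flight_dt}|{flight_num}"
--         first_seen.setdefault(key, log)
--         if _is_aircraft_change(str(log.get("status_desc", "")).upper()):
--             last_ac[key] = log
--     return {key: last_ac.get(key, log0) for key, log0 in first_seen.items()}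
--
-- def _is_aircraft_change(status_desc: str) -> bool:
--     """Check if modification log entry relates to aircraft change."""
--     if not status_desc:
--         return False
--     upper = status_desc.upper()
--     return any(kw in upper for kw in [
--         "AIRCRAFT", "REG", "SWAP", "EQUIPMENT", "A/C", "AC TYPE",
--         "TAIL", "CHANGE", "REPLACE"
--     ])
-- ===== Notes on version B (the rewrite author's own statement) =====
-- stated objective: alternative
-- what changed: Instead of one index updated under a combined 'new key or aircraft-change' condition, B keeps two maps in one pass (first valid entry per key via setdefault, last aircraft-change entry per key via unconditional overwrite) and merges them afterwards with last_ac.get(key, first_seen[key]).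
import Mathlib
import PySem

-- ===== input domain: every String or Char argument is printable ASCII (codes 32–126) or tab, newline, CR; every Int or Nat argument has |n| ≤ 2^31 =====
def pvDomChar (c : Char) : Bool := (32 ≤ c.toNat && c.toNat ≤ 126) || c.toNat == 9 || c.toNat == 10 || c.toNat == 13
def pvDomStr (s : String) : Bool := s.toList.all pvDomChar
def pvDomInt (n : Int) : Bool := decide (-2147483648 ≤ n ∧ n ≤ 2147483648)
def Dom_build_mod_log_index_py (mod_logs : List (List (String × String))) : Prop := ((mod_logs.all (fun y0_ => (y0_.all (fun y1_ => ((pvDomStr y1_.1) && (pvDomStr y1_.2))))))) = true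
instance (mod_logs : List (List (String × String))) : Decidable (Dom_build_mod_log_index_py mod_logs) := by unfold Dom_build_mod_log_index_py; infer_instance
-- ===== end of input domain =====

-- B replaces A's single index updated under a combined condition by two maps
-- (first valid entry / last aircraft-change entry per key) merged after the pass;
-- same cost, alternative decomposition.

-- ===== PORT A =====
-- shared helper: the same-module Python helper _is_aircraft_change, used verbatim by both A and B
def pv_isAircraftChange (status_desc : String) : Bool :=
  if status_desc == "" then false
  else
    let upper := PySem.Str.upper status_desc
    (["AIRCRAFT", "REG", "SWAP", "EQUIPMENT", "A/C", "AC TYPE",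
      "TAIL", "CHANGE", "REPLACE"]).any (fun kw => PySem.Str.isIn kw upper)

-- one iteration of A's for-loop
def pvStepA (index : PySem.Dict String (List (String × String)))
    (log : List (String × String)) : PySem.Dict String (List (String × String)) :=
  let flight_num := PySem.Str.strip ((PySem.Dict.mk log).getD "flight_number" "")
  let flight_dt := PySem.Str.strip ((PySem.Dict.mk log).getD "flight_date" "")
  if flight_num == "" then index
  else
    let key := flight_dt ++ "|" ++ flight_num
    let status := PySem.Str.upper ((PySem.Dict.mk log).getD "status_desc" "")
    let existing := index.get? key
    -- Python truthiness of `existing`: None or the empty dict are falsy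
    let notExisting : Bool := match existing with
      | none => true
      | some l => l.isEmpty
    if notExisting || pv_isAircraftChange status then index.insert key log else index

def build_mod_log_index_py (mod_logs : List (List (String × String))) : List (String × List (String × String)) :=
  let index : PySem.Dict String (List (String × String)) := PySem.Dict.empty
  if mod_logs.isEmpty then index.items
  else (mod_logs.foldl pvStepA index).items

-- ===== PORT B =====
-- one iteration of B's for-loop over the pair (first_seen, last_ac)
def pvStepB (st : PySem.Dict String (List (String × String)) × PySem.Dict String (List (String × String)))
    (log : List (String × String)) :
    PySem.Dict String (List (String × String)) × PySem.Dict String (List (String × String)) :=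
  let flight_num := PySem.Str.strip ((PySem.Dict.mk log).getD "flight_number" "")
  if flight_num == "" then st
  else
    let flight_dt := PySem.Str.strip ((PySem.Dict.mk log).getD "flight_date" "")
    let key := flight_dt ++ "|" ++ flight_num
    let first_seen := st.1.setdefault key log
    let last_ac :=
      if pv_isAircraftChange (PySem.Str.upper ((PySem.Dict.mk log).getD "status_desc" "")) then
        st.2.insert key log
      else st.2
    (first_seen, last_ac)

def build_mod_log_index_py_alt (mod_logs : List (List (String × String))) : List (String × List (String × String)) :=
  let st := mod_logs.foldl pvStepB (PySem.Dict.empty, PySem.Dict.empty)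
  st.1.items.map (fun p => (p.1, st.2.getD p.1 p.2))

-- ===== PRECONDITION & SPEC =====
def Spec_build_mod_log_index_py (mod_logs : List (List (String × String))) (out : List (String × List (String × String))) : Prop := out = build_mod_log_index_py_alt mod_logs
instance (mod_logs : List (List (String × String))) (out : List (String × List (String × String))) : Decidable (Spec_build_mod_log_index_py mod_logs out) := by unfold Spec_build_mod_log_index_py; infer_instance

-- ===== CLAIM (what is proved, stated in full; the proofs are below) =====
def Claim_equal_build_mod_log_index_py : Prop := ∀ (mod_logs : List (List (String × String))), Dom_build_mod_log_index_py mod_logs → Spec_build_mod_log_index_py mod_logs (build_mod_log_index_py mod_logs)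

-- ===== LEMMAS AND PROOFS =====

-- invariant tying A's single index to B's pair of maps
def pvInv (a fs la : PySem.Dict String (List (String × String))) : Prop :=
  a.items = fs.items.map (fun p => (p.1, la.getD p.1 p.2)) ∧
  (∀ k, la.contains k = true → fs.contains k = true) ∧
  (∀ p ∈ a.items, p.2 ≠ [])

theorem pvInv_step (a fs la : PySem.Dict String (List (String × String)))
    (log : List (String × String)) (h : pvInv a fs la) :
    pvInv (pvStepA a log) (pvStepB (fs, la) log).1 (pvStepB (fs, la) log).2 := by
  obtain ⟨h1, h2, h3⟩ := h
  have hkeys : a.keys = fs.keys := by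
    show a.items.map Prod.fst = fs.items.map Prod.fst
    rw [h1, List.map_map]; rfl
  have hcont : ∀ k', a.contains k' = fs.contains k' := by
    intro k'
    rw [PySem.Dict.contains_eq_decide_mem_keys, PySem.Dict.contains_eq_decide_mem_keys, hkeys]
  unfold pvStepA pvStepB
  by_cases hfn : (PySem.Str.strip ((PySem.Dict.mk log).getD "flight_number" "") == "") = true
  · simp only [hfn, if_true]; exact ⟨h1, h2, h3⟩
  · rw [Bool.not_eq_true] at hfn
    simp only [hfn, Bool.false_eq_true, if_false]
    have hlog : log ≠ [] := by
      intro e; subst e; revert hfn; decide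
    set key := PySem.Str.strip ((PySem.Dict.mk log).getD "flight_date" "") ++ "|" ++ PySem.Str.strip ((PySem.Dict.mk log).getD "flight_number" "") with hkeydef
    set ac := pv_isAircraftChange (PySem.Str.upper ((PySem.Dict.mk log).getD "status_desc" "")) with hacdef
    by_cases hc : fs.contains key = true
    · -- key already present: setdefault is a no-op
      rw [PySem.Dict.setdefault_of_contains fs log hc]
      have haC : a.contains key = true := by rw [hcont]; exact hc
      have hsome : (a.get? key).isSome = true := by
        rw [← PySem.Dict.contains_eq_isSome_get?]; exact haC
      obtain ⟨l, hget⟩ := Option.isSome_iff_exists.mp hsome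
      have hl : l.isEmpty = false := by
        simpa using h3 (key, l) (PySem.Dict.mem_items_of_get?_eq_some a hget)
      by_cases hac : ac = true
      · simp only [hac, if_true, hget, Bool.or_true]
        refine ⟨?_, ?_, ?_⟩
        · rw [PySem.Dict.items_insert_of_contains a log haC, h1, List.map_map]
          apply List.map_congr_left
          intro p hp
          by_cases hpk : p.1 = key
          · simp only [Function.comp, hpk, BEq.rfl, if_true]
            rw [PySem.Dict.getD_eq_get?_getD, PySem.Dict.get?_insert_self]
            rfl
          · have hne : (la.insert key log).get? p.1 = la.get? p.1 :=
              PySem.Dict.get?_insert_of_ne la log hpk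
            simp only [Function.comp, beq_iff_eq, hpk, if_false,
              PySem.Dict.getD_eq_get?_getD, hne]
        · intro k hk
          rw [PySem.Dict.contains_insert] at hk
          rcases Bool.or_eq_true_iff.mp hk with hk | hk
          · rw [show k = key from beq_iff_eq.mp hk]; exact hc
          · exact h2 k hk
        · intro p hp
          rw [PySem.Dict.items_insert_of_contains a log haC] at hp
          obtain ⟨q, hq, hpq⟩ := List.mem_map.mp hp
          by_cases hqk : (q.1 == key) = true
          · rw [if_pos hqk] at hpq; rw [← hpq]; exact hlog
          · rw [if_neg (by simp [hqk])] at hpq; rw [← hpq]; exact h3 q hq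
      · rw [Bool.not_eq_true] at hac
        simp only [hac, Bool.false_eq_true, if_false, hget, hl, Bool.or_false]
        exact ⟨h1, h2, h3⟩
    · -- new key: both sides append
      rw [Bool.not_eq_true] at hc
      have haC : a.contains key = false := by rw [hcont]; exact hc
      have hget : a.get? key = none := (PySem.Dict.get?_eq_none_iff_contains a key).mpr haC
      have hla : la.contains key = false := by
        cases hlac : la.contains key
        · rfl
        · exact absurd (h2 key hlac) (by rw [hc]; simp)
      rw [PySem.Dict.setdefault_of_not_contains fs log hc]
      have hkmem : key ∉ fs.keys := by
        have := PySem.Dict.contains_eq_decide_mem_keys fs key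
        rw [hc] at this
        exact of_decide_eq_false this.symm
      have hgetla' : ∀ (la' : PySem.Dict String (List (String × String))),
          (∀ k', k' ≠ key → la'.get? k' = la.get? k') → la'.getD key log = log →
          pvInv (a.insert key log) (fs.insert key log) la' := by
        intro la' hsame hself2
        refine ⟨?_, ?_, ?_⟩
        · rw [PySem.Dict.items_insert_of_not_contains a log haC,
            PySem.Dict.items_insert_of_not_contains fs log hc, List.map_append]
          congr 1
          · rw [h1]
            apply List.map_congr_left
            intro p hp
            have hpk : p.1 ≠ key := by
              intro e
              exact hkmem (e ▸ List.mem_map_of_mem (f := Prod.fst) hp)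
            rw [PySem.Dict.getD_eq_get?_getD, PySem.Dict.getD_eq_get?_getD, hsame p.1 hpk]
          · simp [hself2]
        · intro k hk
          rw [PySem.Dict.contains_insert]
          by_cases hkk : k = key
          · simp [hkk]
          · rw [PySem.Dict.contains_eq_isSome_get?, hsame k hkk,
              ← PySem.Dict.contains_eq_isSome_get?] at hk
            rw [h2 k hk]
            simp
        · intro p hp
          rw [PySem.Dict.items_insert_of_not_contains a log haC] at hp
          rcases List.mem_append.mp hp with hp | hp
          · exact h3 p hp
          · simp only [List.mem_singleton] at hp
            rw [hp]
            exact hlog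
      by_cases hac : ac = true
      · simp only [hac, if_true, hget, Bool.true_or]
        exact hgetla' (la.insert key log)
          (fun k' hk' => PySem.Dict.get?_insert_of_ne la log hk')
          (by rw [PySem.Dict.getD_eq_get?_getD, PySem.Dict.get?_insert_self]; rfl)
      · rw [Bool.not_eq_true] at hac
        simp only [hac, Bool.false_eq_true, if_false, hget, Bool.true_or]
        exact hgetla' la (fun _ _ => rfl) (PySem.Dict.getD_of_not_contains la log hla)

theorem pvInv_foldl (logs : List (List (String × String)))
    (a fs la : PySem.Dict String (List (String × String))) (h : pvInv a fs la) :
    pvInv (logs.foldl pvStepA a) (logs.foldl pvStepB (fs, la)).1 (logs.foldl pvStepB (fs, la)).2 := by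
  induction logs generalizing a fs la with
  | nil => exact h
  | cons x t ih =>
    simp only [List.foldl_cons]
    have := pvInv_step a fs la x h
    have hp : pvStepB (fs, la) x = ((pvStepB (fs, la) x).1, (pvStepB (fs, la) x).2) := rfl
    rw [hp]
    exact ih _ _ _ this

-- ===== VERDICT (by name: the statement is the Claim_ definition above) =====
theorem build_mod_log_index_py_spec : Claim_equal_build_mod_log_index_py := by
  intro mod_logs _
  unfold Spec_build_mod_log_index_py build_mod_log_index_py build_mod_log_index_py_alt
  have h0 : pvInv PySem.Dict.empty PySem.Dict.empty PySem.Dict.empty := by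
    refine ⟨rfl, ?_, ?_⟩ <;> simp [PySem.Dict.empty]
  have h := pvInv_foldl mod_logs PySem.Dict.empty PySem.Dict.empty PySem.Dict.empty h0
  cases mod_logs with
  | nil => rfl
  | cons x t =>
    simp only [List.isEmpty_cons, Bool.false_eq_true, if_false]
    exact h.1
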